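-- pv_equiv track=rewrite | github.com/Maikelsuwisto/MS-Video-Tools-with-Database | app/utils.py | wrap_text_to_two_lines
-- ===== SOURCE A (Python) =====
-- def wrap_text_to_two_lines(sentence: str, max_chars_per_line: int = 40):
--     words = sentence.split()
--     current_line = ""
--     lines = []
--     for word in words:
--         if len(current_line) + len(word) + 1 <= max_chars_per_line:
--             current_line += (" " if current_line else "") + word
--         else:
--             lines.append(current_line)
--             current_line = word
--     if current_line:
--         lines.append(current_line)
--     if len(lines) > 2:
--         lines = [lines[0], " ".join(lines[1:])]
--     return lines
-- ===== SOURCE B (Python) =====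
-- def wrap_text_to_two_lines(sentence: str, max_chars_per_line: int = 40):
--     # Compute only the first greedy line; everything after the first overflow
--     # becomes the second line directly (no multi-line wrap + merge).
--     words = sentence.split()
--     if not words:
--         return []
--     first = ""
--     rest = words
--     while rest:
--         w = rest[0]
--         if len(first) + len(w) + 1 > max_chars_per_line:
--             break
--         first += (" " if first else "") + w
--         rest = rest[1:]
--     if not rest:
--         return [first]
--     return [first, " ".join(rest)]
-- ===== Notes on version B (the rewrite author's own statement) =====
-- stated objective: simpler
-- what changed: B computes only the first greedy line and makes everything after the first overflow the second line directly, dropping A's full multi-line wrap and its len(lines)>2 merge step.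
import Mathlib
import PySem

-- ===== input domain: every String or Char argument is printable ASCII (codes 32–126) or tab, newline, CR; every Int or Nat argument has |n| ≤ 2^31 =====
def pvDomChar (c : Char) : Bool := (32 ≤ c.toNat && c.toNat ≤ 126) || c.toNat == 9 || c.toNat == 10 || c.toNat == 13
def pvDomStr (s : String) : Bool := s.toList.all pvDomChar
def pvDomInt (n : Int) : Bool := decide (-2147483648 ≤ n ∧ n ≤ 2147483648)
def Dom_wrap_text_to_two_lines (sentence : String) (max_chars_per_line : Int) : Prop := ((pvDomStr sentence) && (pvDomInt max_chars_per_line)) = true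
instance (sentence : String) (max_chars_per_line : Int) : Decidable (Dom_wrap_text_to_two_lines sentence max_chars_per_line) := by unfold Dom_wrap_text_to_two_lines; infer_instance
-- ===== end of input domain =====

-- B computes only the first greedy line and turns the remaining words directly into the
-- second line, dropping A's full multi-line wrap and its len(lines)>2 merge (objective: simpler).

-- ===== PORT A =====
-- A: greedy multi-line wrap, then merge lines[1:] into one second line (ported on List Char; exact there).
def aStep (max_chars_per_line : Int) (s : List Char × List (List Char)) (word : List Char) :
    List Char × List (List Char) :=
  if PySem.Chars.len s.1 + PySem.Chars.len word + 1 ≤ max_chars_per_line then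
    (s.1 ++ (if s.1.isEmpty then [] else [' ']) ++ word, s.2)
  else
    (word, s.2 ++ [s.1])

def wrap_text_to_two_lines (sentence : String) (max_chars_per_line : Int) : List String :=
  let words := PySem.Chars.split₀ sentence.toList
  let r := words.foldl (aStep max_chars_per_line) ([], [])
  let lines := if r.1.isEmpty then r.2 else r.2 ++ [r.1]
  let lines2 := if 2 < lines.length then [lines.headD [], PySem.Chars.join [' '] lines.tail]
                else lines
  lines2.map String.ofList

-- ===== PORT B =====
-- B: the while/break loop of Source B building only the first line; the unconsumed words are the rest.
def bLoop (max_chars_per_line : Int) (first : List Char) :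
    List (List Char) → List Char × List (List Char)
  | [] => (first, [])
  | w :: ws =>
    if max_chars_per_line < PySem.Chars.len first + PySem.Chars.len w + 1 then
      (first, w :: ws)
    else
      bLoop max_chars_per_line (first ++ (if first.isEmpty then [] else [' ']) ++ w) ws

def wrap_text_to_two_lines_alt (sentence : String) (max_chars_per_line : Int) : List String :=
  let words := PySem.Chars.split₀ sentence.toList
  if words.isEmpty then []
  else
    let r := bLoop max_chars_per_line [] words
    if r.2.isEmpty then [String.ofList r.1]
    else [String.ofList r.1, String.ofList (PySem.Chars.join [' '] r.2)]

-- ===== PRECONDITION & SPEC =====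
def Spec_wrap_text_to_two_lines (sentence : String) (max_chars_per_line : Int) (out : List String) : Prop := out = wrap_text_to_two_lines_alt sentence max_chars_per_line
instance (sentence : String) (max_chars_per_line : Int) (out : List String) : Decidable (Spec_wrap_text_to_two_lines sentence max_chars_per_line out) := by unfold Spec_wrap_text_to_two_lines; infer_instance

-- ===== CLAIM (what is proved, stated in full; the proofs are below) =====
def Claim_equal_wrap_text_to_two_lines : Prop := ∀ (sentence : String) (max_chars_per_line : Int), Dom_wrap_text_to_two_lines sentence max_chars_per_line → Spec_wrap_text_to_two_lines sentence max_chars_per_line (wrap_text_to_two_lines sentence max_chars_per_line)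

-- ===== LEMMAS AND PROOFS =====

-- step-unfolding equations for the two loops
theorem aStep_fit (max : Int) (curr : List Char) (lines : List (List Char)) (w : List Char)
    (h : PySem.Chars.len curr + PySem.Chars.len w + 1 ≤ max) :
    aStep max (curr, lines) w = (curr ++ (if curr.isEmpty then [] else [' ']) ++ w, lines) := by
  simp only [aStep]
  rw [if_pos h]

theorem aStep_fit' (max : Int) (curr : List Char) (lines : List (List Char)) (w : List Char)
    (h : PySem.Chars.len curr + PySem.Chars.len w + 1 ≤ max) (hc : curr ≠ []) :
    aStep max (curr, lines) w = (curr ++ [' '] ++ w, lines) := by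
  rw [aStep_fit max curr lines w h, List.isEmpty_eq_false_iff.mpr hc]
  simp

theorem aStep_nofit (max : Int) (curr : List Char) (lines : List (List Char)) (w : List Char)
    (h : ¬ PySem.Chars.len curr + PySem.Chars.len w + 1 ≤ max) :
    aStep max (curr, lines) w = (w, lines ++ [curr]) := by
  simp only [aStep]
  rw [if_neg h]

theorem bLoop_stop (max : Int) (first w : List Char) (ws : List (List Char))
    (h : max < PySem.Chars.len first + PySem.Chars.len w + 1) :
    bLoop max first (w :: ws) = (first, w :: ws) := by
  simp only [bLoop]
  rw [if_pos h]

theorem bLoop_go (max : Int) (first w : List Char) (ws : List (List Char))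
    (h : ¬ max < PySem.Chars.len first + PySem.Chars.len w + 1) :
    bLoop max first (w :: ws)
      = bLoop max (first ++ (if first.isEmpty then [] else [' ']) ++ w) ws := by
  simp only [bLoop]
  rw [if_neg h]

-- every piece of str.split() is nonempty
theorem split₀_go_ne_nil (s cur : List Char) (acc : List (List Char))
    (hacc : ∀ w ∈ acc, w ≠ []) : ∀ w ∈ PySem.Chars.split₀.go s cur acc, w ≠ [] := by
  induction s generalizing cur acc with
  | nil =>
    intro w hw
    simp only [PySem.Chars.split₀.go] at hw
    split at hw
    · exact hacc w (List.mem_reverse.mp hw)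
    · rename_i hne
      rcases List.mem_cons.mp (List.mem_reverse.mp hw) with h | h
      · subst h
        have hc : cur ≠ [] := by simpa using hne
        simpa using hc
      · exact hacc w h
  | cons c rest ih =>
    intro w hw
    simp only [PySem.Chars.split₀.go] at hw
    split at hw
    · split at hw
      · exact ih [] acc hacc w hw
      · rename_i hne
        refine ih [] (cur.reverse :: acc) ?_ w hw
        intro v hv
        rcases List.mem_cons.mp hv with h | h
        · subst h
          have hc : cur ≠ [] := by simpa using hne
          simpa using hc
        · exact hacc v h
    · exact ih (c :: cur) acc hacc w hw

theorem split₀_ne_nil (s : List Char) : ∀ w ∈ PySem.Chars.split₀ s, w ≠ [] :=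
  split₀_go_ne_nil s [] [] (by simp)

theorem join_cons_ne (x : List Char) (l : List (List Char)) (hl : l ≠ []) :
    PySem.Chars.join [' '] (x :: l) = x ++ [' '] ++ PySem.Chars.join [' '] l := by
  cases l with
  | nil => exact absurd rfl hl
  | cons y t => simp [PySem.Chars.join, List.intercalate, List.intersperse]

-- the lines accumulator of A's loop only grows at the back
theorem aFold_acc (max : Int) (ws : List (List Char)) (curr : List Char) (lines : List (List Char)) :
    ws.foldl (aStep max) (curr, lines)
      = ((ws.foldl (aStep max) (curr, [])).1, lines ++ (ws.foldl (aStep max) (curr, [])).2) := by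
  induction ws generalizing curr lines with
  | nil => simp
  | cons w ws ih =>
    simp only [List.foldl_cons]
    by_cases h : PySem.Chars.len curr + PySem.Chars.len w + 1 ≤ max
    · rw [aStep_fit max curr lines w h, aStep_fit max curr [] w h]
      exact ih _ lines
    · rw [aStep_nofit max curr lines w h, aStep_nofit max curr [] w h]
      rw [ih w (lines ++ [curr]), ih w ([] ++ [curr])]
      simp

-- once a nonempty line is started, A's loop never produces an empty line, and joining
-- all lines it produces (with the final current_line) recovers all remaining words
theorem aFold_join (max : Int) (ws : List (List Char)) (curr : List Char)
    (hcurr : curr ≠ []) (hws : ∀ w ∈ ws, w ≠ []) :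
    (ws.foldl (aStep max) (curr, [])).1 ≠ [] ∧
    PySem.Chars.join [' '] ((ws.foldl (aStep max) (curr, [])).2
        ++ [(ws.foldl (aStep max) (curr, [])).1])
      = PySem.Chars.join [' '] (curr :: ws) := by
  induction ws generalizing curr with
  | nil => exact ⟨hcurr, rfl⟩
  | cons w ws ih =>
    have hw : w ≠ [] := hws w (by simp)
    have hws' : ∀ v ∈ ws, v ≠ [] := fun v hv => hws v (List.mem_cons_of_mem _ hv)
    simp only [List.foldl_cons]
    by_cases h : PySem.Chars.len curr + PySem.Chars.len w + 1 ≤ max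
    · rw [aStep_fit' max curr [] w h hcurr]
      have hcurr' : curr ++ [' '] ++ w ≠ [] := by simp
      obtain ⟨h1, h2⟩ := ih (curr ++ [' '] ++ w) hcurr' hws'
      refine ⟨h1, ?_⟩
      rw [h2]
      rw [join_cons_ne curr (w :: ws) (by simp)]
      cases ws with
      | nil => simp
      | cons y t =>
        rw [join_cons_ne (curr ++ [' '] ++ w) (y :: t) (by simp),
            join_cons_ne w (y :: t) (by simp)]
        simp
    · rw [aStep_nofit max curr [] w h]
      rw [aFold_acc max ws w ([] ++ [curr])]
      obtain ⟨h1, h2⟩ := ih w hw hws'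
      refine ⟨h1, ?_⟩
      have hne : (ws.foldl (aStep max) (w, [])).2 ++ [(ws.foldl (aStep max) (w, [])).1] ≠ [] := by
        simp
      calc PySem.Chars.join [' ']
            ((([] ++ [curr]) ++ (ws.foldl (aStep max) (w, [])).2) ++ [(ws.foldl (aStep max) (w, [])).1])
          = PySem.Chars.join [' ']
            (curr :: ((ws.foldl (aStep max) (w, [])).2 ++ [(ws.foldl (aStep max) (w, [])).1])) := by
            simp
        _ = curr ++ [' '] ++ PySem.Chars.join [' ']
              ((ws.foldl (aStep max) (w, [])).2 ++ [(ws.foldl (aStep max) (w, [])).1]) :=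
            join_cons_ne _ _ hne
        _ = curr ++ [' '] ++ PySem.Chars.join [' '] (w :: ws) := by rw [h2]
        _ = PySem.Chars.join [' '] (curr :: w :: ws) := (join_cons_ne curr (w :: ws) (by simp)).symm

-- A's loop, decomposed at the first overflow: B's first-line loop, then A's loop on the rest
theorem aFold_eq_bLoop (max : Int) (ws : List (List Char)) (first : List Char) :
    ws.foldl (aStep max) (first, [])
      = (match bLoop max first ws with
         | (f, []) => (f, [])
         | (f, w :: rs) =>
             ((rs.foldl (aStep max) (w, [])).1, f :: (rs.foldl (aStep max) (w, [])).2)) := by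
  induction ws generalizing first with
  | nil => simp [bLoop]
  | cons w ws ih =>
    simp only [List.foldl_cons]
    by_cases h : max < PySem.Chars.len first + PySem.Chars.len w + 1
    · rw [bLoop_stop max first w ws h, aStep_nofit max first [] w (not_le.mpr h)]
      rw [aFold_acc max ws w ([] ++ [first])]
      simp
    · rw [bLoop_go max first w ws h, aStep_fit max first [] w (not_lt.mp h)]
      exact ih _

-- members of B's rest are input words
theorem bLoop_rest_mem (max : Int) (ws : List (List Char)) (first : List Char) :
    ∀ v ∈ (bLoop max first ws).2, v ∈ ws := by
  induction ws generalizing first with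
  | nil => intro v hv; simp [bLoop] at hv
  | cons w ws ih =>
    intro v hv
    by_cases h : max < PySem.Chars.len first + PySem.Chars.len w + 1
    · rw [bLoop_stop max first w ws h] at hv
      exact hv
    · rw [bLoop_go max first w ws h] at hv
      exact List.mem_cons_of_mem _ (ih _ v hv)

-- on a nonempty word list, if everything fits then the first line is nonempty
theorem bLoop_first_ne (max : Int) (ws : List (List Char)) (first : List Char)
    (hws : ∀ w ∈ ws, w ≠ []) (hne : first ≠ [] ∨ ws ≠ [])
    (hrest : (bLoop max first ws).2 = []) : (bLoop max first ws).1 ≠ [] := by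
  induction ws generalizing first with
  | nil =>
    rcases hne with h | h
    · exact h
    · exact absurd rfl h
  | cons w ws ih =>
    by_cases h : max < PySem.Chars.len first + PySem.Chars.len w + 1
    · rw [bLoop_stop max first w ws h] at hrest
      simp at hrest
    · rw [bLoop_go max first w ws h] at hrest ⊢
      refine ih _ (fun v hv => hws v (List.mem_cons_of_mem _ hv)) ?_ hrest
      left
      have hw : w ≠ [] := hws w (by simp)
      simp [hw]

-- ===== VERDICT (by name: the statement is the Claim_ definition above) =====
theorem wrap_text_to_two_lines_spec : Claim_equal_wrap_text_to_two_lines := by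
  intro sentence max _hdom
  unfold Spec_wrap_text_to_two_lines wrap_text_to_two_lines wrap_text_to_two_lines_alt
  have hwords := split₀_ne_nil sentence.toList
  set words := PySem.Chars.split₀ sentence.toList with hwdef
  clear_value words
  cases words with
  | nil => simp
  | cons w0 ws0 =>
    rw [if_neg (by simp)]
    simp only
    rw [aFold_eq_bLoop max (w0 :: ws0) []]
    rcases hb : bLoop max [] (w0 :: ws0) with ⟨f, rest⟩
    cases rest with
    | nil =>
      have hf : f ≠ [] := by
        have h1 := bLoop_first_ne max (w0 :: ws0) [] hwords (Or.inr (by simp)) (by rw [hb])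
        rwa [hb] at h1
      simp [List.isEmpty_eq_false_iff.mpr hf]
    | cons w rs =>
      have hwne : w ≠ [] :=
        hwords w (bLoop_rest_mem max (w0 :: ws0) [] w (by rw [hb]; simp))
      have hrs : ∀ v ∈ rs, v ≠ [] := fun v hv =>
        hwords v (bLoop_rest_mem max (w0 :: ws0) [] v (by rw [hb]; exact List.mem_cons_of_mem _ hv))
      obtain ⟨hc, hjoin⟩ := aFold_join max rs w hwne hrs
      rcases hfold : rs.foldl (aStep max) (w, []) with ⟨c, L⟩
      rw [hfold] at hc hjoin
      simp only at hc hjoin ⊢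
      simp only [hfold]
      rw [if_neg (by simp [hc] : ¬ (c.isEmpty = true))]
      cases L with
      | nil =>
        have hcj : PySem.Chars.join [' '] (w :: rs) = c := by
          rw [← hjoin]
          simp
        simp [hcj]
      | cons x xs =>
        rw [if_pos (by simp : 2 < ((f :: x :: xs) ++ [c]).length)]
        have h3 : PySem.Chars.join [' '] (x :: (xs ++ [c])) = PySem.Chars.join [' '] (w :: rs) := by
          simpa using hjoin
        simp [h3]
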